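-- pv_equiv track=rewrite | github.com/XiaoYang9/FBNAS | codes/centralRepo/utils.py | find_choice_index
-- ===== SOURCE A (Python) =====
-- from itertools import combinations
--
-- def find_choice_index(m, choice):
--     choice_list = []
--     ops = [0, 1, 2, 3]
--     for m_ in range(1, m+1):
--         choices = combinations(ops, m_)
--         for id, operate in enumerate(choices):
--             choice_list.append(list(operate))
--     choice = sorted(choice)
--     index = choice_list.index(choice)
--     return index
-- ===== SOURCE B (Python) =====
-- def _comb(n, k):
--     if k < 0 or k > n:
--         return 0
--     r = 1
--     for i in range(1, k + 1):
--         r = r * (n - k + i) // i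
--     return r
--
-- def find_choice_index(m, choice):
--     s = sorted(choice)
--     L = len(s)
--     if (L < 1 or L > m
--             or any(x not in (0, 1, 2, 3) for x in s)
--             or any(s[i] >= s[i + 1] for i in range(L - 1))):
--         raise ValueError(f"{s} is not in list")
--     # index = (# of shorter combinations) + lexicographic rank among length-L ones
--     offset = sum(_comb(4, k) for k in range(1, L))
--     rank = 0
--     prev = -1
--     for i, v in enumerate(s):
--         for j in range(prev + 1, v):
--             rank += _comb(3 - j, L - 1 - i)
--         prev = v
--     return offset + rank
-- ===== Notes on version B (the rewrite author's own statement) =====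
-- stated objective: faster
-- what changed: B computes the index by direct combinatorial ranking (sum of binomials for shorter lengths plus the lexicographic rank of the sorted choice) after an explicit validity check, instead of materialising the whole enumerated combination list and scanning it with list.index.
import Mathlib
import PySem

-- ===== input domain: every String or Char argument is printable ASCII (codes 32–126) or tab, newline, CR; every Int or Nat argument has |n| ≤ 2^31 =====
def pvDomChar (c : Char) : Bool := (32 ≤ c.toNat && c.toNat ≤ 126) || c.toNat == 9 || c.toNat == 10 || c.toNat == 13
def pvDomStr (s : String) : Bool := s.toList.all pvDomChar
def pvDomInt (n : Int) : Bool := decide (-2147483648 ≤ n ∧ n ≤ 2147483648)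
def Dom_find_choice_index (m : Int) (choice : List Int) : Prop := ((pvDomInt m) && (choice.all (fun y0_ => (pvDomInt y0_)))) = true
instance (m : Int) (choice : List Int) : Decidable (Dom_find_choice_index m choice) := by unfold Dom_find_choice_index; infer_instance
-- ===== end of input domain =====

-- B replaces the build-the-whole-list-and-scan of A by a direct combinatorial ranking; objective: faster (A loops m times, B does bounded work).
-- Neither version mutates its arguments (A sorts a copy).

-- ===== PORT A =====
-- itertools.combinations(pool, r), ported by hand: the standard lexicographic recursion,
-- exact — it emits the same tuples in the same order as the Python iterator.
def pvCombos : List Int → Nat → List (List Int)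
  | _, 0 => [[]]
  | [], _+1 => []
  | x :: xs, k+1 => ((pvCombos xs k).map (fun t => x :: t)) ++ pvCombos xs (k+1)

-- the choice_list built by A's two nested loops (m_ ≥ 1 in the range, so m_.toNat is exact)
def pvClist (m : Int) : List (List Int) :=
  (PySem.List.pyRange 1 (m+1) 1).foldl
    (fun acc m_ =>
      (PySem.List.enumerate (pvCombos [0, 1, 2, 3] m_.toNat) 0).foldl
        (fun a p => a ++ [p.2]) acc)
    []

def find_choice_index (m : Int) (choice : List Int) : Int :=
  let choice_list := pvClist m
  let choice' := PySem.List.sorted choice (fun x => x) false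
  -- choice_list.index(choice) raises ValueError when absent; those inputs are outside Pre_
  (((PySem.List.index? choice_list choice').getD 0 : Nat) : Int)

-- ===== PORT B =====
-- math-free binomial coefficient, as the helper _comb in Source B (multiplicative loop)
def pvComb (n k : Int) : Int :=
  if k < 0 ∨ n < k then 0
  else (PySem.List.pyRange 1 (k+1) 1).foldl
    (fun r i => PySem.Int.floordiv (r * (n - k + i)) i) 1

def find_choice_index_alt (m : Int) (choice : List Int) : Int :=
  let s := PySem.List.sorted choice (fun x => x) false
  let L : Int := s.length
  if L < 1 ∨ m < L
      ∨ s.any (fun x => !(x == 0 || x == 1 || x == 2 || x == 3))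
      ∨ (PySem.List.pyRange 0 (L-1) 1).any
          (fun i => decide (PySem.List.pyGetD s (i+1) 0 ≤ PySem.List.pyGetD s i 0))
  then 0  -- Source B raises ValueError here; these inputs are outside Pre_
  else
    let offset := ((PySem.List.pyRange 1 L 1).map (fun k => pvComb 4 k)).sum
    let rank := (PySem.List.enumerate s 0).foldl
      (fun (p : Int × Int) iv =>
        ((PySem.List.pyRange (p.2 + 1) iv.2 1).foldl
          (fun r j => r + pvComb (3 - j) (L - 1 - iv.1)) p.1, iv.2))
      (0, -1)
    offset + rank.1

-- ===== PRECONDITION & SPEC =====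
-- Pre_ is exactly the set of inputs on which A returns: sorted(choice) must occur in the
-- enumerated list, i.e. choice is nonempty, duplicate-free, drawn from {0,1,2,3}, and no
-- longer than m; everywhere else A raises ValueError (and so does B).
def Pre_find_choice_index (m : Int) (choice : List Int) : Prop :=
  choice ≠ [] ∧ choice.Nodup ∧ (∀ x ∈ choice, x = 0 ∨ x = 1 ∨ x = 2 ∨ x = 3)
    ∧ (choice.length : Int) ≤ m
instance (m : Int) (choice : List Int) : Decidable (Pre_find_choice_index m choice) := by
  unfold Pre_find_choice_index; infer_instance

def pvWitness_find_choice_index : Int × List Int := (2, [1, 0])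

def Spec_find_choice_index (m : Int) (choice : List Int) (out : Int) : Prop := out = find_choice_index_alt m choice
instance (m : Int) (choice : List Int) (out : Int) : Decidable (Spec_find_choice_index m choice out) := by unfold Spec_find_choice_index; infer_instance

-- ===== CLAIM (what is proved, stated in full; the proofs are below) =====
def Claim_equal_find_choice_index : Prop := ∀ (m : Int) (choice : List Int), Dom_find_choice_index m choice → Pre_find_choice_index m choice → Spec_find_choice_index m choice (find_choice_index m choice)

-- ===== LEMMAS AND PROOFS =====

lemma pvCombos_eq_nil : ∀ (xs : List Int) (k : Nat), xs.length < k → pvCombos xs k = [] := by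
  intro xs
  induction xs with
  | nil => intro k hk; cases k with
    | zero => omega
    | succ k => rfl
  | cons x xs ih =>
    intro k hk
    cases k with
    | zero => simp at hk
    | succ k =>
      simp only [pvCombos]
      rw [ih k (by simp at hk ⊢; omega), ih (k+1) (by simp at hk ⊢; omega)]
      simp

lemma pvClist_stab (m : Int) (h : (4:Int) ≤ m) : pvClist m = pvClist 4 := by
  unfold pvClist
  rw [PySem.List.pyRange_one_append 1 5 (m+1) (by norm_num) (by omega), List.foldl_append]
  have aux : ∀ (l : List Int) (acc : List (List Int)), (∀ x ∈ l, (5:Int) ≤ x) →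
      l.foldl (fun acc m_ =>
        (PySem.List.enumerate (pvCombos [0, 1, 2, 3] m_.toNat) 0).foldl
          (fun a p => a ++ [p.2]) acc) acc = acc := by
    intro l
    induction l with
    | nil => intro acc _; rfl
    | cons x l ih =>
      intro acc hx
      have h5 : (5:Int) ≤ x := hx x (by simp)
      have : pvCombos [0, 1, 2, 3] x.toNat = [] := by
        apply pvCombos_eq_nil; simp; omega
      simp only [List.foldl_cons, this, PySem.List.enumerate_nil, List.foldl_nil]
      exact ih acc (fun y hy => hx y (by simp [hy]))
  rw [aux _ _ (fun x hx => ((PySem.List.mem_pyRange_one).mp hx).1)]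
  norm_num

lemma pvBnd {x : Int} (h : x = 0 ∨ x = 1 ∨ x = 2 ∨ x = 3) : 0 ≤ x ∧ x ≤ 3 := by
  rcases h with rfl | rfl | rfl | rfl <;> norm_num

lemma mem_S15 (s : List Int) (hne : s ≠ []) (hlt : s.Pairwise (· < ·))
    (hm : ∀ x ∈ s, x = 0 ∨ x = 1 ∨ x = 2 ∨ x = 3) :
    s ∈ ([[0],[1],[2],[3],[0,1],[0,2],[0,3],[1,2],[1,3],[2,3],
         [0,1,2],[0,1,3],[0,2,3],[1,2,3],[0,1,2,3]] : List (List Int)) := by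
  rcases s with _ | ⟨a, _ | ⟨b, _ | ⟨c, _ | ⟨d, _ | ⟨e, t⟩⟩⟩⟩⟩
  · exact absurd rfl hne
  · rcases hm a (by simp) with rfl | rfl | rfl | rfl <;> decide
  · have hab : a < b := (List.pairwise_cons.mp hlt).1 b (by simp)
    rcases hm a (by simp) with rfl | rfl | rfl | rfl <;>
      rcases hm b (by simp) with rfl | rfl | rfl | rfl <;>
      first | decide | omega
  · simp only [List.pairwise_cons] at hlt
    have hab : a < b := hlt.1 b (by simp)
    have hbc : b < c := hlt.2.1 c (by simp)
    rcases hm a (by simp) with rfl | rfl | rfl | rfl <;>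
      rcases hm b (by simp) with rfl | rfl | rfl | rfl <;>
      rcases hm c (by simp) with rfl | rfl | rfl | rfl <;>
      first | decide | omega
  · simp only [List.pairwise_cons] at hlt
    have hab : a < b := hlt.1 b (by simp)
    have hbc : b < c := hlt.2.1 c (by simp)
    have hcd : c < d := hlt.2.2.1 d (by simp)
    obtain ⟨ha0, _⟩ := pvBnd (hm a (by simp))
    obtain ⟨_, hd3⟩ := pvBnd (hm d (by simp))
    have : a = 0 ∧ b = 1 ∧ c = 2 ∧ d = 3 := by omega
    obtain ⟨rfl, rfl, rfl, rfl⟩ := this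
    decide
  · simp only [List.pairwise_cons] at hlt
    have hab : a < b := hlt.1 b (by simp)
    have hbc : b < c := hlt.2.1 c (by simp)
    have hcd : c < d := hlt.2.2.1 d (by simp)
    have hde : d < e := hlt.2.2.2.1 e (by simp)
    obtain ⟨ha0, _⟩ := pvBnd (hm a (by simp))
    obtain ⟨_, he3⟩ := pvBnd (hm e (by simp))
    omega

-- ===== VERDICT (by name: the statement is the Claim_ definition above) =====
theorem find_choice_index_spec : Claim_equal_find_choice_index := by
  intro m choice _hdom hpre
  unfold Spec_find_choice_index
  obtain ⟨hne, hnd, hmem, hlen⟩ := hpre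
  simp only [find_choice_index, find_choice_index_alt]
  set s := PySem.List.sorted choice (fun x => x) false with hs
  have hperm : s.Perm choice := PySem.List.sorted_perm choice (fun x => x) false
  have hsne : s ≠ [] := by
    intro h; apply hne
    rw [← List.length_eq_zero_iff, ← hperm.length_eq, h]; rfl
  have hsnd : s.Nodup := hperm.nodup_iff.mpr hnd
  have hsmem : ∀ x ∈ s, x = 0 ∨ x = 1 ∨ x = 2 ∨ x = 3 :=
    fun x hx => hmem x (hperm.mem_iff.mp hx)
  have hsle : s.Pairwise (· ≤ ·) := by
    simpa using PySem.List.sorted_pairwise choice (fun x => x)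
  have hslt : s.Pairwise (· < ·) := by
    have := List.Pairwise.and hsle hsnd
    exact this.imp (fun h => lt_of_le_of_ne h.1 h.2)
  have hlen' : (s.length : Int) ≤ m := by rw [hperm.length_eq]; exact hlen
  have hS := mem_S15 s hsne hslt hsmem
  clear_value s
  clear hs hperm hsne hsnd hsmem hsle hslt hlen hne hnd hmem _hdom
  fin_cases hS <;>
  · simp only [List.length_cons, List.length_nil] at hlen'
    push_cast at hlen'
    by_cases h4 : m ≤ 4
    · interval_cases m <;> decide
    · rw [pvClist_stab m (by omega), if_neg ?_]
      · decide
      · rintro (h | h | h | h)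
        · revert h; decide
        · simp at h; omega
        · revert h; decide
        · revert h; decide
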